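-- pv_equiv track=rewrite | github.com/yhshu/Distribution-Shifts-for-KBQA | src/utils/question_pattern.py | s_expression_with_labels
-- ===== SOURCE A (Python) =====
-- def s_expression_with_labels(s_expr, entities, lowercase=True, simplify_literal_prefix=False):
--     res = s_expr
--     if s_expr is None:
--         return res
--     if entities is not None and len(entities):
--         mid_list = [entity['id'] for entity in entities if entity['id'] in s_expr]
--         if len(mid_list):
--             res += '|entity'
--         for entity in entities:
--             if entity['id'] not in s_expr:
--                 continue
--             if 'friendly_name' in entity:
--                 name = entity['friendly_name']
--             else:
--                 name = entity['label']
--             if lowercase: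
--                 name = name.lower()
--             res += '|' + entity['id'] + ' ' + name
--     if simplify_literal_prefix:
--         res = res.replace('^^http://www.w3.org/2001/XMLSchema#', '^^')
--     return res
-- ===== SOURCE B (Python) =====
-- def s_expression_with_labels(s_expr, entities, lowercase=True, simplify_literal_prefix=False):
--     if s_expr is None:
--         return None
--
--     def annotate(ents):
--         # build the annotation suffix back-to-front by structural recursion
--         if not ents:
--             return ''
--         head = ents[0]
--         tail = annotate(ents[1:])
--         if head['id'] not in s_expr:
--             return tail
--         name = head['friendly_name'] if 'friendly_name' in head else head['label']
--         if lowercase: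
--             name = name.lower()
--         return '|' + head['id'] + ' ' + name + tail
--
--     suffix = annotate(entities) if entities else ''
--     res = s_expr if suffix == '' else s_expr + '|entity' + suffix
--     if simplify_literal_prefix:
--         res = res.replace('^^http://www.w3.org/2001/XMLSchema#', '^^')
--     return res
-- ===== Notes on version B (the rewrite author's own statement) =====
-- stated objective: alternative
-- what changed: A scans entities twice (a comprehension over all entities to decide the '|entity' marker, then a second imperative loop appending to res piece by piece); B makes a single recursive pass that builds the annotation suffix back-to-front and decides the marker afterwards by whether that suffix is empty (correct because each fragment starts with '|', so the suffix is empty iff no entity id occurs in s_expr), with no matched-id list at all.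
import Mathlib
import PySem

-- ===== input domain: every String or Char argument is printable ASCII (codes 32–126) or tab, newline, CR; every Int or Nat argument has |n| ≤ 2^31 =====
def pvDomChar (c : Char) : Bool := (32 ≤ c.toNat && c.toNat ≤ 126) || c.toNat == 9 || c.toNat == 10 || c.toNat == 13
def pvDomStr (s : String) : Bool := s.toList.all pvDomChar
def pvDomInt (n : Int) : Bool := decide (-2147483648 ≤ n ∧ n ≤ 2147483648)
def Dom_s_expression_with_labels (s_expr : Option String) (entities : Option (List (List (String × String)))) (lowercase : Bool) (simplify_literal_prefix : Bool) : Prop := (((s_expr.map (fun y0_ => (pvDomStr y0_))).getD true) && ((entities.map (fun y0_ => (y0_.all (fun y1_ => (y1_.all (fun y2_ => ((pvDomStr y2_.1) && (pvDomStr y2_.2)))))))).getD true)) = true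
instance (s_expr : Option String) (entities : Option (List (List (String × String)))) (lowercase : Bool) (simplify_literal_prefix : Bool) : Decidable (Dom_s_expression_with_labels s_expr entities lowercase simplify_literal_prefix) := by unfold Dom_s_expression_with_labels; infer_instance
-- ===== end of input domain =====

-- B replaces A's two loops (marker-detection comprehension + appending loop) by one recursion building the suffix back-to-front, deciding the '|entity' marker by the suffix's emptiness; objective: alternative (same asymptotic cost).


-- ===== PORT A =====
-- entity['id'] with dict-as-assoc-list: first match; getD "" only fires outside Pre_ (Python raises KeyError there)
def pvIdA (e : List (String × String)) : String := (List.lookup "id" e).getD ""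

-- 'friendly_name' in entity / entity['label'], then optional .lower()
def pvNameA (e : List (String × String)) (lowercase : Bool) : String :=
  let name := match List.lookup "friendly_name" e with
    | some fn => fn
    | none => (List.lookup "label" e).getD ""
  if lowercase then PySem.Str.lower name else name

def s_expression_with_labels (s_expr : Option String) (entities : Option (List (List (String × String)))) (lowercase : Bool) (simplify_literal_prefix : Bool) : Option String :=
  match s_expr with
  | none => none
  | some se =>
    let res := se
    let res :=
      match entities with
      | some ents =>
        if ents.length ≠ 0 then
          let mid_list := (ents.filter (fun e => PySem.Str.isIn (pvIdA e) se)).map pvIdA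
          let res := if mid_list.length ≠ 0 then res ++ "|entity" else res
          ents.foldl (fun r e =>
            if !(PySem.Str.isIn (pvIdA e) se) then r
            else r ++ "|" ++ pvIdA e ++ " " ++ pvNameA e lowercase) res
        else res
      | none => res
    some (if simplify_literal_prefix then PySem.Str.replace res "^^http://www.w3.org/2001/XMLSchema#" "^^" else res)

-- ===== PORT B =====
def pvIdB (e : List (String × String)) : String := (List.lookup "id" e).getD ""

def pvNameB (e : List (String × String)) (lowercase : Bool) : String :=
  let name := match List.lookup "friendly_name" e with
    | some fn => fn
    | none => (List.lookup "label" e).getD ""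
  if lowercase then PySem.Str.lower name else name

-- B's recursive annotate: builds the annotation suffix back-to-front
def pvAnnotate (se : String) (lowercase : Bool) : List (List (String × String)) → String
  | [] => ""
  | e :: rest =>
    let tail := pvAnnotate se lowercase rest
    if PySem.Str.isIn (pvIdB e) se then "|" ++ pvIdB e ++ " " ++ pvNameB e lowercase ++ tail
    else tail

def s_expression_with_labels_alt (s_expr : Option String) (entities : Option (List (List (String × String)))) (lowercase : Bool) (simplify_literal_prefix : Bool) : Option String :=
  match s_expr with
  | none => none
  | some se =>
    let suffix :=
      match entities with
      | some ents => if ents.length ≠ 0 then pvAnnotate se lowercase ents else ""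
      | none => ""
    let res := if suffix = "" then se else se ++ "|entity" ++ suffix
    some (if simplify_literal_prefix then PySem.Str.replace res "^^http://www.w3.org/2001/XMLSchema#" "^^" else res)

-- ===== PRECONDITION & SPEC =====
-- Pre_ excludes inputs where Python A raises KeyError (an entity without an 'id' key, or a matching
-- entity with neither 'friendly_name' nor 'label'), and entities whose association list carries a
-- duplicate key, which has no Python-dict counterpart (a Python dict cannot hold two bindings of one key).
def pvPreCheck (s_expr : Option String) (entities : Option (List (List (String × String)))) : Bool :=
  match s_expr, entities with
  | some se, some ents =>
    ents.all (fun e =>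
      decide (e.map Prod.fst).Nodup &&
      (List.lookup "id" e).isSome &&
      (!(PySem.Str.isIn ((List.lookup "id" e).getD "") se) ||
        (List.lookup "friendly_name" e).isSome || (List.lookup "label" e).isSome))
  | _, _ => true

def Pre_s_expression_with_labels (s_expr : Option String) (entities : Option (List (List (String × String)))) (lowercase : Bool) (simplify_literal_prefix : Bool) : Prop :=
  pvPreCheck s_expr entities = true
instance (s_expr : Option String) (entities : Option (List (List (String × String)))) (lowercase : Bool) (simplify_literal_prefix : Bool) : Decidable (Pre_s_expression_with_labels s_expr entities lowercase simplify_literal_prefix) := by unfold Pre_s_expression_with_labels; infer_instance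

def pvWitness_s_expression_with_labels : Option String × (Option (List (List (String × String)))) × Bool × Bool :=
  (some "(JOIN m.01 x)", some [[("id", "m.01"), ("label", "Foo")], [("id", "m.02"), ("friendly_name", "Bar")]], true, false)

def Spec_s_expression_with_labels (s_expr : Option String) (entities : Option (List (List (String × String)))) (lowercase : Bool) (simplify_literal_prefix : Bool) (out : Option String) : Prop := out = s_expression_with_labels_alt s_expr entities lowercase simplify_literal_prefix
instance (s_expr : Option String) (entities : Option (List (List (String × String)))) (lowercase : Bool) (simplify_literal_prefix : Bool) (out : Option String) : Decidable (Spec_s_expression_with_labels s_expr entities lowercase simplify_literal_prefix out) := by unfold Spec_s_expression_with_labels; infer_instance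

-- ===== CLAIM (what is proved, stated in full; the proofs are below) =====
def Claim_equal_s_expression_with_labels : Prop := ∀ (s_expr : Option String) (entities : Option (List (List (String × String)))) (lowercase : Bool) (simplify_literal_prefix : Bool), Dom_s_expression_with_labels s_expr entities lowercase simplify_literal_prefix → Pre_s_expression_with_labels s_expr entities lowercase simplify_literal_prefix → Spec_s_expression_with_labels s_expr entities lowercase simplify_literal_prefix (s_expression_with_labels s_expr entities lowercase simplify_literal_prefix)

-- ===== LEMMAS AND PROOFS =====
-- A's appending loop equals prepending r0 to B's recursively built suffix.
theorem pv_fold_eq_annotate (se : String) (lowercase : Bool) :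
    ∀ (ents : List (List (String × String))) (r0 : String),
      ents.foldl (fun r e =>
        if !(PySem.Str.isIn (pvIdA e) se) then r
        else r ++ "|" ++ pvIdA e ++ " " ++ pvNameA e lowercase) r0
      = r0 ++ pvAnnotate se lowercase ents := by
  intro ents
  induction ents with
  | nil => intro r0; simp [pvAnnotate]
  | cons e rest ih =>
    intro r0
    by_cases h : PySem.Str.isIn (pvIdA e) se = true
    · have hB : PySem.Str.isIn (pvIdB e) se = true := h
      simp only [List.foldl_cons, pvAnnotate, h, hB, Bool.not_true, Bool.false_eq_true,
        if_false, if_true, ih]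
      simp [pvIdA, pvIdB, pvNameA, pvNameB, String.append_assoc]
    · have h' : PySem.Str.isIn (pvIdA e) se = false := Bool.eq_false_iff.mpr h
      have hb : (!PySem.Str.isIn (pvIdA e) se) = true := by rw [h']; rfl
      have h2 : PySem.Str.isIn (pvIdB e) se = false := h'
      rw [List.foldl_cons, if_pos hb]
      simp only [pvAnnotate, h2, Bool.false_eq_true, if_false]
      exact ih r0

-- the suffix is empty iff no entity id occurs in s_expr (each fragment starts with '|')
theorem pv_annotate_empty_iff (se : String) (lowercase : Bool) :
    ∀ (ents : List (List (String × String))),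
      pvAnnotate se lowercase ents = "" ↔
        ents.filter (fun e => PySem.Str.isIn (pvIdA e) se) = [] := by
  intro ents
  induction ents with
  | nil => simp [pvAnnotate]
  | cons e rest ih =>
    by_cases h : PySem.Str.isIn (pvIdA e) se = true
    · have h2 : PySem.Str.isIn (pvIdB e) se = true := h
      simp only [pvAnnotate, h2, if_true, List.filter_cons, h]
      constructor
      · intro hcontra
        have := congrArg String.toList hcontra
        simp [String.toList_append] at this
      · intro hcontra; simp at hcontra
    · have h' : PySem.Str.isIn (pvIdA e) se = false := Bool.eq_false_iff.mpr h
      have h2 : PySem.Str.isIn (pvIdB e) se = false := h'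
      simp only [pvAnnotate, h2, Bool.false_eq_true, if_false, List.filter_cons, h', ih]

-- ===== VERDICT (by name: the statement is the Claim_ definition above) =====
theorem s_expression_with_labels_spec : Claim_equal_s_expression_with_labels := by
  intro s_expr entities lowercase simplify_literal_prefix _ _
  unfold Spec_s_expression_with_labels s_expression_with_labels s_expression_with_labels_alt
  cases s_expr with
  | none => rfl
  | some se =>
    cases entities with
    | none => rfl
    | some ents =>
      by_cases hne : ents.length ≠ 0
      · simp only [if_pos hne, pv_fold_eq_annotate]
        by_cases hm : pvAnnotate se lowercase ents = ""
        · have hfil : ents.filter (fun e => PySem.Str.isIn (pvIdA e) se) = [] :=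
            (pv_annotate_empty_iff se lowercase ents).mp hm
          rw [hm, hfil]
          simp
        · have hfil : ents.filter (fun e => PySem.Str.isIn (pvIdA e) se) ≠ [] := by
            intro hc; exact hm ((pv_annotate_empty_iff se lowercase ents).mpr hc)
          have hlen : ((ents.filter (fun e => PySem.Str.isIn (pvIdA e) se)).map pvIdA).length ≠ 0 := by
            simpa using hfil
          rw [if_pos hlen, if_neg hm, String.append_assoc]
      · simp only [if_neg hne]
        simp
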